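-- pv_equiv track=rewrite | github.com/CristofherAndres/Codigos_Python | Prueba 3/burbuja.py | validar_order
-- ===== SOURCE A (Python) =====
-- def validar_order(datos):
--     largo = len(datos)
--     contador=0
--     for i in range(largo-1):
--         if datos[i]<=datos[i+1]:
--             contador+=1
--     if contador==largo-1:
--         return False
--     return True
-- ===== SOURCE B (Python) =====
-- def validar_order(datos):
--     return datos != sorted(datos)
-- ===== Notes on version B (the rewrite author's own statement) =====
-- stated objective: simpler
-- what changed: Replaces the index loop that counts non-decreasing adjacent pairs and compares the count with len-1 by building sorted(datos) and returning whether it differs from datos.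
-- intended difference: On the empty list A returns True (its counter 0 never equals len-1 = -1) although an empty list is trivially sorted; B returns False, the intended answer. — e.g. on validar_order([]): A returns true, B returns false
import Mathlib
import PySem

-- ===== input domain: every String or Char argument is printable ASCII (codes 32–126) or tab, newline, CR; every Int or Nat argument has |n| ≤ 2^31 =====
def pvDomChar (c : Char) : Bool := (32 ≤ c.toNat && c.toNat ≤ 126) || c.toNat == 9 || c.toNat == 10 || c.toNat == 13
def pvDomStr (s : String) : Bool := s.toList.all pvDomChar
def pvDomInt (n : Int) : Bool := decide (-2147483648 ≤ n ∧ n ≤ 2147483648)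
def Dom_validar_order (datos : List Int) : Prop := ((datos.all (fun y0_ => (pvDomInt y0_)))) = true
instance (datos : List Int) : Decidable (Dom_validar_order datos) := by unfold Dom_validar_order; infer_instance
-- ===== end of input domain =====

-- B replaces A's adjacent-pair counting loop by sort-then-compare; on [] A returns True by an off-by-one (0 ≠ -1), B returns the intended False.

-- ===== PORT A =====
def validar_order (datos : List Int) : Bool :=
  let largo : Int := datos.length
  let contador : Int :=
    (PySem.List.pyRange 0 (largo - 1) 1).foldl
      (fun c i =>
        if PySem.List.pyGetD datos i 0 ≤ PySem.List.pyGetD datos (i + 1) 0 then c + 1 else c) 0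
  if contador = largo - 1 then false else true

-- ===== PORT B =====
def validar_order_alt (datos : List Int) : Bool :=
  !(datos == PySem.List.sorted datos (fun x => x) false)

-- ===== PRECONDITION & SPEC =====
-- On the empty list A returns True (its counter 0 never equals len-1 = -1) although an empty
-- list is trivially sorted; B returns False, the intended answer.
def D_validar_order (datos : List Int) : Prop := datos = []
instance (datos : List Int) : Decidable (D_validar_order datos) := by unfold D_validar_order; infer_instance
def Spec_validar_order (datos : List Int) (out : Bool) : Prop := ¬ D_validar_order datos → out = validar_order_alt datos
instance (datos : List Int) (out : Bool) : Decidable (Spec_validar_order datos out) := by unfold Spec_validar_order; infer_instance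
def pvDiffWitness_validar_order : List Int := []
def pvDiffWitnessOut_validar_order : Bool × Bool := (true, false)

-- ===== CLAIM (what is proved, stated in full; the proofs are below) =====
def Claim_unchanged_validar_order : Prop := ∀ (datos : List Int), Dom_validar_order datos → Spec_validar_order datos (validar_order datos)
def Claim_changed_validar_order : Prop := Dom_validar_order (pvDiffWitness_validar_order) ∧ D_validar_order (pvDiffWitness_validar_order) ∧ validar_order (pvDiffWitness_validar_order) = pvDiffWitnessOut_validar_order.1 ∧ validar_order_alt (pvDiffWitness_validar_order) = pvDiffWitnessOut_validar_order.2 ∧ pvDiffWitnessOut_validar_order.1 ≠ pvDiffWitnessOut_validar_order.2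
def Claim_exact_validar_order : Prop := ∀ (datos : List Int), Dom_validar_order datos → D_validar_order datos → validar_order datos ≠ validar_order_alt datos

-- ===== LEMMAS AND PROOFS =====

/-- A counting foldl, generalized over the accumulator, is `countP`. -/
lemma foldl_count_eq_countP (p : Nat → Bool) (l : List Nat) (c : Int) :
    l.foldl (fun c k => if p k then c + 1 else c) c = c + (l.countP p : Int) := by
  induction l generalizing c with
  | nil => simp
  | cons x xs ih =>
    by_cases h : p x <;> simp [List.foldl_cons, h, ih]
    ring

/-- A's counter counts the k < n-1 with datos[k] ≤ datos[k+1]. -/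
lemma contador_eq (datos : List Int) :
    (PySem.List.pyRange 0 ((datos.length : Int) - 1) 1).foldl
      (fun c i =>
        if PySem.List.pyGetD datos i 0 ≤ PySem.List.pyGetD datos (i + 1) 0 then c + 1 else c) 0
    = ((List.range (datos.length - 1)).countP
        (fun k => decide (datos.getD k 0 ≤ datos.getD (k + 1) 0)) : Int) := by
  rw [PySem.List.pyRange_one, List.foldl_map]
  have hlen : (((datos.length : Int) - 1 - 0)).toNat = datos.length - 1 := by omega
  rw [hlen]
  rw [show (fun (c : Int) (k : Nat) =>
        if PySem.List.pyGetD datos ((0 : Int) + k) 0 ≤ PySem.List.pyGetD datos ((0 : Int) + k + 1) 0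
        then c + 1 else c)
      = fun (c : Int) (k : Nat) =>
        if (fun k => decide (datos.getD k 0 ≤ datos.getD (k + 1) 0)) k then c + 1 else c from by
    funext c k
    have h2 : ((k : Int)) + 1 = (((k + 1 : Nat)) : Int) := by push_cast; ring
    simp only [zero_add, h2, PySem.List.pyGetD_natCast]
    simp]
  rw [foldl_count_eq_countP]
  simp

lemma validar_order_false_iff (datos : List Int) (h : datos ≠ []) :
    validar_order datos = false ↔ datos.Pairwise (· ≤ ·) := by
  have hn : 1 ≤ datos.length := List.length_pos_iff.mpr h
  simp only [validar_order]
  rw [contador_eq]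
  have hle := List.countP_le_length
    (p := fun k => decide (datos.getD k 0 ≤ datos.getD (k + 1) 0)) (l := List.range (datos.length - 1))
  rw [List.length_range] at hle
  rw [← List.isChain_iff_pairwise]
  rw [List.isChain_iff_getElem]
  constructor
  · intro hfalse i hi
    by_contra hcon
    have hall : (List.range (datos.length - 1)).countP
        (fun k => decide (datos.getD k 0 ≤ datos.getD (k + 1) 0)) = datos.length - 1 := by
      simp only [ite_eq_left_iff] at hfalse
      by_contra hne
      have := hfalse (by omega)
      simp at this
    have hall' : (List.range (datos.length - 1)).countP
        (fun k => decide (datos.getD k 0 ≤ datos.getD (k + 1) 0)) = (List.range (datos.length - 1)).length := by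
      rw [List.length_range]; exact hall
    rw [List.countP_eq_length] at hall'
    have := hall' i (List.mem_range.mpr (by omega))
    simp only [decide_eq_true_eq] at this
    rw [List.getD_eq_getElem datos 0 (by omega), List.getD_eq_getElem datos 0 (by omega)] at this
    exact hcon this
  · intro hchain
    have hall : (List.range (datos.length - 1)).countP
        (fun k => decide (datos.getD k 0 ≤ datos.getD (k + 1) 0)) = datos.length - 1 := by
      have hforall : ∀ k ∈ List.range (datos.length - 1),
          (fun k => decide (datos.getD k 0 ≤ datos.getD (k + 1) 0)) k = true := by
        intro k hk
        rw [List.mem_range] at hk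
        simp only [decide_eq_true_eq]
        rw [List.getD_eq_getElem datos 0 (by omega), List.getD_eq_getElem datos 0 (by omega)]
        exact hchain k (by omega)
      have := List.countP_eq_length.mpr hforall
      rw [List.length_range] at this
      exact this
    have hcond : ((List.range (datos.length - 1)).countP
        (fun k => decide (datos.getD k 0 ≤ datos.getD (k + 1) 0)) : Int) = (datos.length : Int) - 1 := by
      rw [hall]; omega
    rw [if_pos hcond]

lemma validar_order_alt_false_iff (datos : List Int) :
    validar_order_alt datos = false ↔ datos.Pairwise (· ≤ ·) := by
  unfold validar_order_alt
  simp only [Bool.not_eq_false', beq_iff_eq]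
  constructor
  · intro hEq
    have hp := PySem.List.sorted_pairwise (xs := datos) (key := fun x => x)
    rw [← hEq] at hp
    simpa using hp
  · intro hp
    exact (PySem.List.sorted_eq_self_of_pairwise datos (fun x => x) (by simpa using hp)).symm

-- ===== VERDICT =====
theorem validar_order_spec : Claim_unchanged_validar_order := by
  intro datos _ hD
  have h : datos ≠ [] := hD
  have h1 := validar_order_false_iff datos h
  have h2 := validar_order_alt_false_iff datos
  cases hA : validar_order datos <;> cases hB : validar_order_alt datos <;> simp_all

theorem validar_order_changed : Claim_changed_validar_order := by
  unfold Claim_changed_validar_order; decide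

theorem validar_order_tight : Claim_exact_validar_order := by
  intro datos _ hD
  subst hD
  decide
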